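-- pv_equiv track=rewrite | github.com/Kangrant/MyOTE | tag_utils.py | bio2bieos
-- ===== SOURCE A (Python) =====
-- def bio2bieos(tags):
--     new_tags = []
--     for i, tag in enumerate(tags):
--         if tag == 'O':
--             new_tags.append(tag)
--         # elif tag == 'S':
--         #     new_tags.append(tag)
--         elif tag[0] == 'B':
--             if i + 1 != len(tags) and \
--                tags[i + 1][0] == 'I':
--                 new_tags.append(tag)
--             else:
--                 new_tags.append(tag.replace('B', 'S'))
--         elif tag[0] == 'I':
--             if (i + 1 < len(tags) and tags[i + 1][0] == 'I')  :
--                 new_tags.append(tag)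
--             else:
--                 new_tags.append(tag.replace('I', 'E'))
--         else:
--             raise Exception('Invalid IOB format!')
--     return new_tags
-- ===== SOURCE B (Python) =====
-- def bio2bieos(tags):
--     new_tags = []
--     next_is_I = False
--     for tag in reversed(tags):
--         if tag == 'O':
--             new_tags.append('O')
--         elif tag[0] == 'B':
--             new_tags.append(tag if next_is_I else tag.replace('B', 'S'))
--         elif tag[0] == 'I':
--             new_tags.append(tag if next_is_I else tag.replace('I', 'E'))
--         else:
--             raise Exception('Invalid IOB format!')
--         next_is_I = tag[0] == 'I'
--     new_tags.reverse()
--     return new_tags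
-- ===== Notes on version B (the rewrite author's own statement) =====
-- stated objective: alternative
-- what changed: Single reverse-order pass carrying a boolean next_is_I accumulator instead of the index-based lookahead tags[i+1][0] at each step.
import Mathlib
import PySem

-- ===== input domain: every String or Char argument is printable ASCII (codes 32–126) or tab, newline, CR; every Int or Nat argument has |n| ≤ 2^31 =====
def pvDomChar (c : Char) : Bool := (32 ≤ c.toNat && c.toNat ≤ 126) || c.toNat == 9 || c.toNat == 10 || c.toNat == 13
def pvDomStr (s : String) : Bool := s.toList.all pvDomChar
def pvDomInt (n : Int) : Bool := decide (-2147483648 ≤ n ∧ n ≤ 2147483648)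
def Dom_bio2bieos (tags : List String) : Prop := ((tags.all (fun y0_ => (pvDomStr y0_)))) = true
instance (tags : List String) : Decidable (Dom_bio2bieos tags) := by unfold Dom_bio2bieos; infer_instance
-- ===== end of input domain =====

-- B replaces A's index-based lookahead with a reverse-order pass carrying a next_is_I accumulator (alternative decomposition, same cost).


-- ===== PORT A =====
-- one loop iteration of A: 'raise Exception(...)' has no value; the port returns "" there (excluded by Pre_)
def aStep (tags : List String) (i : Int) (tag : String) : String :=
  if tag = "O" then tag
  else if PySem.Str.pyGet? tag 0 = some 'B' then
    (if (i + 1 ≠ (tags.length : Int)) ∧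
        ((PySem.List.pyGet? tags (i + 1)).bind (fun t => PySem.Str.pyGet? t 0) = some 'I')
     then tag else PySem.Str.replace tag "B" "S")
  else if PySem.Str.pyGet? tag 0 = some 'I' then
    (if (i + 1 < (tags.length : Int)) ∧
        ((PySem.List.pyGet? tags (i + 1)).bind (fun t => PySem.Str.pyGet? t 0) = some 'I')
     then tag else PySem.Str.replace tag "I" "E")
  else ""

def bio2bieos (tags : List String) : List String :=
  (PySem.List.enumerate tags).foldl (fun acc p => acc ++ [aStep tags p.1 p.2]) []

-- ===== PORT B =====
def bStartsI (tag : String) : Bool := PySem.Str.pyGet? tag 0 == some 'I'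

-- one loop iteration of B: 'raise Exception(...)' has no value; the port returns "!" there (excluded by Pre_)
def bStep (nextIsI : Bool) (tag : String) : String :=
  if tag = "O" then "O"
  else if PySem.Str.pyGet? tag 0 = some 'B' then
    (if nextIsI then tag else PySem.Str.replace tag "B" "S")
  else if PySem.Str.pyGet? tag 0 = some 'I' then
    (if nextIsI then tag else PySem.Str.replace tag "I" "E")
  else "!"

def bLoop : List String → Bool → List String → List String
  | [], _, acc => acc
  | t :: rest, nxt, acc => bLoop rest (bStartsI t) (acc ++ [bStep nxt t])

def bio2bieos_alt (tags : List String) : List String :=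
  (bLoop tags.reverse false []).reverse

-- ===== PRECONDITION & SPEC =====
-- A raises (IndexError on an empty tag, or Exception('Invalid IOB format!')) on any tag that is not 'O'
-- and does not start with 'B' or 'I'; Pre_ excludes exactly those inputs (B raises there too).
def Pre_bio2bieos (tags : List String) : Prop :=
  ∀ t ∈ tags, t = "O" ∨ PySem.Str.pyGet? t 0 = some 'B' ∨ PySem.Str.pyGet? t 0 = some 'I'
instance (tags : List String) : Decidable (Pre_bio2bieos tags) := by unfold Pre_bio2bieos; infer_instance
def pvWitness_bio2bieos : List String := ["B-LOC", "I-LOC", "O"]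

def Spec_bio2bieos (tags : List String) (out : List String) : Prop := out = bio2bieos_alt tags
instance (tags : List String) (out : List String) : Decidable (Spec_bio2bieos tags out) := by unfold Spec_bio2bieos; infer_instance

-- ===== CLAIM (what is proved, stated in full; the proofs are below) =====
def Claim_equal_bio2bieos : Prop := ∀ (tags : List String), Dom_bio2bieos tags → Pre_bio2bieos tags → Spec_bio2bieos tags (bio2bieos tags)

-- ===== LEMMAS AND PROOFS =====

-- reference "zip with next" form both ports are reduced to
def hdI : List String → Bool
  | [] => false
  | u :: _ => bStartsI u

def zipN : List String → List String
  | [] => []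
  | t :: rest => bStep (hdI rest) t :: zipN rest

theorem zipN_length (l : List String) : (zipN l).length = l.length := by
  induction l with
  | nil => rfl
  | cons t rest ih => simp [zipN, ih]

theorem zipN_getElem (l : List String) (k : Nat) (hk : k < l.length) :
    (zipN l)[k]'(by rw [zipN_length]; exact hk) = bStep (hdI (l.drop (k + 1))) (l[k]'hk) := by
  induction l generalizing k with
  | nil => simp at hk
  | cons t rest ih =>
    cases k with
    | zero => simp [zipN]
    | succ n => simpa [zipN] using ih n (by simpa using hk)

-- B side
def bList : List String → Bool → List String
  | [], _ => []
  | t :: rest, nxt => bStep nxt t :: bList rest (bStartsI t)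

theorem bLoop_eq_bList (l : List String) : ∀ nxt acc, bLoop l nxt acc = acc ++ bList l nxt := by
  induction l with
  | nil => intro nxt acc; simp [bLoop, bList]
  | cons t rest ih => intro nxt acc; simp [bLoop, bList, ih]

theorem bList_reverse (l : List String) : ∀ suf,
    (bList l (hdI suf)).reverse ++ zipN suf = zipN (l.reverse ++ suf) := by
  induction l with
  | nil => intro suf; simp [bList]
  | cons t rest ih =>
    intro suf
    have h1 : bStartsI t = hdI (t :: suf) := rfl
    have h2 : bStep (hdI suf) t :: zipN suf = zipN (t :: suf) := rfl
    calc (bList (t :: rest) (hdI suf)).reverse ++ zipN suf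
        = (bList rest (hdI (t :: suf))).reverse ++ zipN (t :: suf) := by
          simp [bList, h1, ← h2]
      _ = zipN (rest.reverse ++ t :: suf) := ih (t :: suf)
      _ = zipN ((t :: rest).reverse ++ suf) := by simp

theorem alt_eq_zipN (tags : List String) : bio2bieos_alt tags = zipN tags := by
  have h := bList_reverse tags.reverse []
  simp [zipN] at h
  unfold bio2bieos_alt
  rw [bLoop_eq_bList]
  simpa using h

-- A side
theorem foldl_app_singleton (f : Int × String → String) (l : List (Int × String)) :
    ∀ init : List String, l.foldl (fun acc p => acc ++ [f p]) init = init ++ l.map f := by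
  induction l with
  | nil => intro init; simp
  | cons p rest ih => intro init; simp [ih]

theorem a_eq_map (tags : List String) :
    bio2bieos tags = (PySem.List.enumerate tags).map (fun p => aStep tags p.1 p.2) := by
  unfold bio2bieos
  rw [foldl_app_singleton (fun p => aStep tags p.1 p.2)]
  simp

theorem a_elem (tags : List String) (h : Pre_bio2bieos tags) (k : Nat) (hk : k < tags.length) :
    aStep tags ((0 : Int) + k) (tags[k]'hk) = bStep (hdI (tags.drop (k + 1))) (tags[k]'hk) := by
  have hmem : tags[k]'hk ∈ tags := List.getElem_mem hk
  rcases h _ hmem with hO | hB | hI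
  · simp [aStep, bStep, hO]
  · -- tag starts with 'B'
    have hne : ¬(tags[k]'hk = "O") := by
      intro he; rw [he] at hB; exact absurd hB (by decide)
    simp only [aStep, bStep]
    rw [if_neg hne, if_neg hne, if_pos hB, if_pos hB]
    by_cases hend : k + 1 = tags.length
    · have hdrop : tags.drop (k + 1) = [] := by simp [hend]
      have h1 : ((0 : Int) + k + 1) = (tags.length : Int) := by rw [← hend]; push_cast; ring
      have hc : ¬(((0 : Int) + k + 1 ≠ (tags.length : Int)) ∧
          ((PySem.List.pyGet? tags ((0 : Int) + k + 1)).bind (fun t => PySem.Str.pyGet? t 0) = some 'I')) :=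
        fun hcc => hcc.1 h1
      rw [if_neg hc, hdrop]
      simp [hdI]
    · have hlt : k + 1 < tags.length := by omega
      have hA : PySem.List.pyGet? tags ((0 : Int) + k + 1) = some (tags[k+1]'hlt) := by
        have : ((0 : Int) + k + 1) = ((k + 1 : Nat) : Int) := by push_cast; ring
        rw [this, PySem.List.pyGet?_natCast]
        simp [hlt]
      have hdrop : tags.drop (k + 1) = (tags[k+1]'hlt) :: tags.drop (k + 2) :=
        List.drop_eq_getElem_cons hlt
      have h1 : ((0 : Int) + k + 1) ≠ (tags.length : Int) := by
        intro he; apply hend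
        have : ((k + 1 : Nat) : Int) = (tags.length : Int) := by push_cast; omega
        exact_mod_cast this
      by_cases hnxt : PySem.Str.pyGet? (tags[k+1]'hlt) 0 = some 'I'
      · have hnxt' : PySem.List.pyGet? ((tags[k+1]'hlt).toList) 0 = some 'I' := by simpa using hnxt
        have hb : hdI (tags.drop (k + 1)) = true := by
          rw [hdrop]; simp [hdI, bStartsI, hnxt']
        rw [if_pos ⟨h1, by rw [hA]; simpa using hnxt⟩, hb, if_pos rfl]
      · have hnxt' : ¬(PySem.List.pyGet? ((tags[k+1]'hlt).toList) 0 = some 'I') := by simpa using hnxt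
        have hb : hdI (tags.drop (k + 1)) = false := by
          rw [hdrop]; simp [hdI, bStartsI, hnxt']
        have hc : ¬(((0 : Int) + k + 1 ≠ (tags.length : Int)) ∧
            ((PySem.List.pyGet? tags ((0 : Int) + k + 1)).bind (fun t => PySem.Str.pyGet? t 0) = some 'I')) := by
          intro hcc; apply hnxt; have h2 := hcc.2; rw [hA] at h2; simpa using h2
        rw [if_neg hc, hb]
        simp
  · -- tag starts with 'I'
    have hne : ¬(tags[k]'hk = "O") := by
      intro he; rw [he] at hI; exact absurd hI (by decide)
    have hBI : ¬(PySem.Str.pyGet? (tags[k]'hk) 0 = some 'B') := by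
      intro hh; rw [hI] at hh; exact absurd hh (by decide)
    simp only [aStep, bStep]
    rw [if_neg hne, if_neg hne, if_neg hBI, if_neg hBI, if_pos hI, if_pos hI]
    by_cases hend : k + 1 = tags.length
    · have hdrop : tags.drop (k + 1) = [] := by simp [hend]
      have h1 : ¬(((0 : Int) + k + 1) < (tags.length : Int)) := by
        have : ((0 : Int) + k + 1) = (tags.length : Int) := by rw [← hend]; push_cast; ring
        omega
      have hc : ¬((((0 : Int) + k + 1) < (tags.length : Int)) ∧
          ((PySem.List.pyGet? tags ((0 : Int) + k + 1)).bind (fun t => PySem.Str.pyGet? t 0) = some 'I')) :=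
        fun hcc => h1 hcc.1
      rw [if_neg hc, hdrop]
      simp [hdI]
    · have hlt : k + 1 < tags.length := by omega
      have hA : PySem.List.pyGet? tags ((0 : Int) + k + 1) = some (tags[k+1]'hlt) := by
        have : ((0 : Int) + k + 1) = ((k + 1 : Nat) : Int) := by push_cast; ring
        rw [this, PySem.List.pyGet?_natCast]
        simp [hlt]
      have hdrop : tags.drop (k + 1) = (tags[k+1]'hlt) :: tags.drop (k + 2) :=
        List.drop_eq_getElem_cons hlt
      have h1 : ((0 : Int) + k + 1) < (tags.length : Int) := by
        have : ((k : Int) + 1) < (tags.length : Int) := by exact_mod_cast hlt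
        omega
      by_cases hnxt : PySem.Str.pyGet? (tags[k+1]'hlt) 0 = some 'I'
      · have hnxt' : PySem.List.pyGet? ((tags[k+1]'hlt).toList) 0 = some 'I' := by simpa using hnxt
        have hb : hdI (tags.drop (k + 1)) = true := by
          rw [hdrop]; simp [hdI, bStartsI, hnxt']
        rw [if_pos ⟨h1, by rw [hA]; simpa using hnxt⟩, hb, if_pos rfl]
      · have hnxt' : ¬(PySem.List.pyGet? ((tags[k+1]'hlt).toList) 0 = some 'I') := by simpa using hnxt
        have hb : hdI (tags.drop (k + 1)) = false := by
          rw [hdrop]; simp [hdI, bStartsI, hnxt']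
        have hc : ¬((((0 : Int) + k + 1) < (tags.length : Int)) ∧
            ((PySem.List.pyGet? tags ((0 : Int) + k + 1)).bind (fun t => PySem.Str.pyGet? t 0) = some 'I')) := by
          intro hcc; apply hnxt; have h2 := hcc.2; rw [hA] at h2; simpa using h2
        rw [if_neg hc, hb]
        simp

theorem a_eq_zipN (tags : List String) (h : Pre_bio2bieos tags) : bio2bieos tags = zipN tags := by
  rw [a_eq_map]
  apply List.ext_getElem
  · simp [zipN_length, PySem.List.length_enumerate]
  · intro k h1 h2
    have hk : k < tags.length := by simpa [PySem.List.length_enumerate] using h1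
    rw [List.getElem_map, PySem.List.getElem_enumerate, zipN_getElem tags k hk]
    exact a_elem tags h k hk

-- ===== VERDICT (by name: the statement is the Claim_ definition above) =====
theorem bio2bieos_spec : Claim_equal_bio2bieos := by
  intro tags _ hpre
  unfold Spec_bio2bieos
  rw [a_eq_zipN tags hpre, alt_eq_zipN]
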